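-- pv_equiv track=rewrite | github.com/alvaroFeher0/Test_Llm | Jaume/data_to_context_utils.py | summarize_match_actions
-- ===== SOURCE A (Python) =====
-- from collections import Counter
--
-- def summarize_match_actions(actions):
--     stats = {}
--     for a in actions:
--         name = a.get("playerName", "Unknown")
--         act = a.get("action") or a.get("Action")
--         stats.setdefault(name, Counter())[act] += 1
--
--     lines = []
--     for player, actions in stats.items():
--         acts_text = ", ".join([f"{k}: {v}" for k, v in actions.items()])
--         lines.append(f"{player} — {acts_text}")
--     return "\n".join(lines)
-- ===== SOURCE B (Python) =====
-- from collections import Counter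
--
-- def summarize_match_actions(actions):
--     # Pass 1: one flat Counter keyed by (player, action).
--     flat = Counter()
--     for a in actions:
--         name = a.get("playerName", "Unknown")
--         act = a.get("action") or a.get("Action")
--         flat[(name, act)] += 1
--     # Pass 2: group the flat counts per player, preserving first-seen order.
--     grouped = {}
--     for (name, act), n in flat.items():
--         grouped.setdefault(name, []).append((act, n))
--     lines = [f"{player} — " + ", ".join(f"{k}: {v}" for k, v in pairs)
--              for player, pairs in grouped.items()]
--     return "\n".join(lines)
-- ===== Notes on version B (the rewrite author's own statement) =====
-- stated objective: alternative
-- what changed: B counts all events into one flat Counter keyed by (player, action) tuples in a single pass and then groups the flat counts per player in a separate pass, instead of A's incrementally maintained dict of per-player Counters.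
import Mathlib
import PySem

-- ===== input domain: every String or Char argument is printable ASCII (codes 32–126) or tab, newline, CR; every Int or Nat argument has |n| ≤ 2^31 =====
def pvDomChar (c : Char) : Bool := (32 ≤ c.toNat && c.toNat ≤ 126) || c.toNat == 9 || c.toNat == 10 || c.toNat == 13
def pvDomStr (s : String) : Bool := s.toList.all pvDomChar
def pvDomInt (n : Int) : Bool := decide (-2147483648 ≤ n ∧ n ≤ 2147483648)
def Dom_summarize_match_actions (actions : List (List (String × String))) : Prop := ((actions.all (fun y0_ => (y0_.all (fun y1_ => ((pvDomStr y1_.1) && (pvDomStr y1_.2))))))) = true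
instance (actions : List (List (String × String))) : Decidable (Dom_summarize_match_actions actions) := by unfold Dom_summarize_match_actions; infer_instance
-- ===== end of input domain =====

-- B counts all (player, action) events into ONE flat counter in a single pass and groups it
-- afterwards, instead of A's dict-of-Counters built incrementally; objective: alternative
-- decomposition (same asymptotic cost).

-- ===== PORT A =====
-- shared helpers: the field reads both Pythons perform on each action dict
-- a.get(k) on a dict[str,str]: first-match association-list lookup
def sma_get (a : List (String × String)) (k : String) : Option String :=
  List.lookup k a

-- name = a.get("playerName", "Unknown")
def sma_name (a : List (String × String)) : String :=
  (sma_get a "playerName").getD "Unknown"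

-- act = a.get("action") or a.get("Action")   (Python `or`: falsy = None or "")
def sma_act (a : List (String × String)) : Option String :=
  match sma_get a "action" with
  | some s => if s = "" then sma_get a "Action" else some s
  | none => sma_get a "Action"

-- f"{k}: {v}" where k may be None (str(None) = "None")
def sma_entry (kv : Option String × Int) : String :=
  (match kv.1 with | some s => s | none => "None") ++ ": " ++ PySem.Int.toStr kv.2

-- A's first loop: stats.setdefault(name, Counter())[act] += 1
def sma_stats (actions : List (List (String × String))) :
    PySem.Dict String (PySem.Dict (Option String) Int) :=
  actions.foldl (fun stats a =>
    stats.modify (sma_name a) PySem.Dict.empty (fun c => c.modify (sma_act a) 0 (· + 1)))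
    PySem.Dict.empty

def summarize_match_actions (actions : List (List (String × String))) : String :=
  PySem.Str.join "\n"
    ((sma_stats actions).items.foldl (fun lines pl =>
      lines ++ [pl.1 ++ " — " ++ PySem.Str.join ", " (pl.2.items.map sma_entry)]) [])

-- ===== PORT B =====
-- B pass 1: flat[(name, act)] += 1
def sma_flat (actions : List (List (String × String))) :
    PySem.Dict (String × Option String) Int :=
  actions.foldl (fun d a => d.modify (sma_name a, sma_act a) 0 (· + 1)) PySem.Dict.empty

-- B pass 2: grouped.setdefault(name, []).append((act, n))
def sma_grouped (actions : List (List (String × String))) :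
    PySem.Dict String (List (Option String × Int)) :=
  (sma_flat actions).items.foldl
    (fun g p => g.modify p.1.1 [] (· ++ [(p.1.2, p.2)])) PySem.Dict.empty

def summarize_match_actions_alt (actions : List (List (String × String))) : String :=
  PySem.Str.join "\n"
    ((sma_grouped actions).items.map (fun pl =>
      pl.1 ++ " — " ++ PySem.Str.join ", " (pl.2.map sma_entry)))

-- ===== PRECONDITION & SPEC =====
def Spec_summarize_match_actions (actions : List (List (String × String))) (out : String) : Prop := out = summarize_match_actions_alt actions
instance (actions : List (List (String × String))) (out : String) : Decidable (Spec_summarize_match_actions actions out) := by unfold Spec_summarize_match_actions; infer_instance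

-- ===== CLAIM (what is proved, stated in full; the proofs are below) =====
def Claim_equal_summarize_match_actions : Prop := ∀ (actions : List (List (String × String))), Dom_summarize_match_actions actions → Spec_summarize_match_actions actions (summarize_match_actions actions)

-- ===== LEMMAS AND PROOFS =====

theorem discard_eq_filter {α : Type} [BEq α] [LawfulBEq α] (s : PySem.Set α) (x : α) :
    PySem.Set.discard s x = s.filter (fun y => !(y == x)) := by
  simp [PySem.Set.discard]

theorem filter_ofList {α : Type} [BEq α] [LawfulBEq α] (xs : List α) (p : α → Bool) :
    (PySem.Set.ofList xs).filter p = PySem.Set.ofList (xs.filter p) := by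
  induction xs with
  | nil => rfl
  | cons x xs ih =>
    by_cases h : p x = true
    · simp only [PySem.Set.ofList_cons, List.filter_cons, h, if_pos,
        discard_eq_filter, List.filter_filter, ← ih]
      refine congrArg (x :: ·) (List.filter_congr (fun a _ => ?_))
      exact Bool.and_comm _ _
    · simp only [List.filter_cons, h, PySem.Set.ofList_cons,
        discard_eq_filter, List.filter_filter, ← ih, Bool.false_eq_true, reduceIte]
      refine (List.filter_congr (fun a _ => ?_)).symm
      by_cases hx : a = x <;> simp [hx, h]

theorem map_discard {α β : Type} [BEq α] [LawfulBEq α] [BEq β] [LawfulBEq β]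
    (s : PySem.Set α) (f : α → β) (x : α)
    (hinj : ∀ y ∈ s, f y = f x → y = x) :
    (PySem.Set.discard s x).map f = PySem.Set.discard (s.map f) (f x) := by
  induction s with
  | nil => rfl
  | cons y s ih =>
    simp only [discard_eq_filter, List.filter_cons, List.map_cons] at *
    by_cases hy : y = x
    · simp [hy]
      rw [← discard_eq_filter, ← discard_eq_filter] at ih
      exact ih (fun z hz => hinj z (List.mem_cons_of_mem _ hz))
    · have hfy : ¬ f y = f x := fun h => hy (hinj y (List.mem_cons_self) h)
      simp [hy, hfy]
      rw [← discard_eq_filter, ← discard_eq_filter] at ih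
      exact ih (fun z hz => hinj z (List.mem_cons_of_mem _ hz))

theorem ofList_map_of_inj {α β : Type} [BEq α] [LawfulBEq α] [BEq β] [LawfulBEq β]
    (xs : List α) (f : α → β)
    (hinj : ∀ a ∈ xs, ∀ b ∈ xs, f a = f b → a = b) :
    PySem.Set.ofList (xs.map f) = (PySem.Set.ofList xs).map f := by
  induction xs with
  | nil => rfl
  | cons x xs ih =>
    simp only [List.map_cons, PySem.Set.ofList_cons]
    rw [ih (fun a ha b hb => hinj a (List.mem_cons_of_mem _ ha) b (List.mem_cons_of_mem _ hb)),
        map_discard]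
    intro y hy hfy
    have : y ∈ x :: xs := List.mem_cons_of_mem _ ((PySem.Set.mem_ofList _ _).1 hy)
    exact hinj y this x List.mem_cons_self hfy

theorem count_map_of_inj {α β : Type} [BEq α] [LawfulBEq α] [BEq β] [LawfulBEq β]
    (xs : List α) (f : α → β) (a : α)
    (hinj : ∀ b ∈ xs, f b = f a → b = a) :
    (xs.map f).count (f a) = xs.count a := by
  induction xs with
  | nil => rfl
  | cons x xs ih =>
    simp only [List.map_cons, List.count_cons]
    rw [ih (fun b hb => hinj b (List.mem_cons_of_mem _ hb))]
    by_cases hx : x = a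
    · simp [hx]
    · have : ¬ f x = f a := fun h => hx (hinj x List.mem_cons_self h)
      simp [hx, this]

theorem ofList_map_ofList {α β : Type} [BEq α] [LawfulBEq α] [BEq β] [LawfulBEq β]
    (xs : List α) (f : α → β) :
    PySem.Set.ofList ((PySem.Set.ofList xs).map f) = PySem.Set.ofList (xs.map f) := by
  induction xs using List.reverseRecOn with
  | nil => rfl
  | append_singleton xs x ih =>
    rw [PySem.Set.ofList_append_singleton, List.map_append, List.map_singleton,
      PySem.Set.ofList_append_singleton]
    by_cases hx : x ∈ PySem.Set.ofList xs
    · rw [PySem.Set.add_of_mem hx, ih, PySem.Set.add_of_mem]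
      rw [PySem.Set.mem_ofList]
      exact List.mem_map_of_mem ((PySem.Set.mem_ofList _ _).1 hx)
    · rw [PySem.Set.add_of_not_mem hx, List.map_append, List.map_singleton,
        PySem.Set.ofList_append_singleton, ih]

theorem getD_foldl_modify_modify {γ κ η : Type} [BEq κ] [LawfulBEq κ] [DecidableEq κ] [BEq η] [LawfulBEq η]
    (l : List γ) (f : γ → κ) (g : γ → η) (n : κ) (s : PySem.Dict κ (PySem.Dict η Int)) :
    (l.foldl (fun d a => d.modify (f a) PySem.Dict.empty (fun c => c.modify (g a) 0 (· + 1))) s).getD n PySem.Dict.empty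
    = (l.filter (fun a => f a == n)).foldl (fun c a => c.modify (g a) 0 (· + 1)) (s.getD n PySem.Dict.empty) := by
  induction l generalizing s with
  | nil => rfl
  | cons a l ih =>
    rw [List.foldl_cons, ih, List.filter_cons]
    by_cases h : f a = n
    · simp [h]
    · simp [PySem.Dict.getD_modify, h, Ne.symm h]

-- the (name, act) key B counts by
def sma_key (a : List (String × String)) : String × Option String := (sma_name a, sma_act a)

-- characterization of A's nested dict
theorem sma_stats_keys (actions : List (List (String × String))) :
    (sma_stats actions).keys = PySem.Set.ofList (actions.map sma_name) := by
  unfold sma_stats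
  rw [PySem.Dict.keys_foldl_modify_key (key := sma_name)]
  simp [PySem.Set.update_nil_left]

theorem sma_stats_getD (actions : List (List (String × String))) (n : String) :
    (sma_stats actions).getD n PySem.Dict.empty
    = PySem.Dict.counter ((actions.filter (fun a => sma_name a == n)).map sma_act) := by
  unfold sma_stats
  rw [getD_foldl_modify_modify, PySem.Dict.counter_eq_foldl, List.foldl_map]
  simp

-- characterization of B's flat counter and its grouping
theorem sma_flat_eq (actions : List (List (String × String))) :
    sma_flat actions = PySem.Dict.counter (actions.map sma_key) := by
  unfold sma_flat
  rw [PySem.Dict.counter_eq_foldl, List.foldl_map]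
  rfl

theorem sma_grouped_keys (actions : List (List (String × String))) :
    (sma_grouped actions).keys = PySem.Set.ofList (actions.map sma_name) := by
  unfold sma_grouped
  rw [PySem.Dict.keys_foldl_modify_key (key := fun p : (String × Option String) × Int => p.1.1) (f := fun _ p => (· ++ [(p.1.2, p.2)]))]
  rw [sma_flat_eq, PySem.Dict.items_counter]
  simp only [PySem.Set.update_nil_left, PySem.Dict.keys_empty, List.map_map]
  have : ((fun p : (String × Option String) × Int => p.1.1) ∘ fun k => (k, ((actions.map sma_key).count k : Int)))
      = fun k : String × Option String => k.1 := rfl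
  rw [this, ofList_map_ofList, List.map_map]
  rfl

theorem sma_grouped_getD (actions : List (List (String × String))) (n : String) :
    (sma_grouped actions).getD n []
    = (PySem.Set.ofList ((actions.map sma_key).filter (fun k => k.1 == n))).map
        (fun k => (k.2, ((actions.map sma_key).count k : Int))) := by
  unfold sma_grouped
  have h1 : (sma_flat actions).items.foldl
        (fun g p => g.modify p.1.1 [] (· ++ [(p.1.2, p.2)])) PySem.Dict.empty
      = ((sma_flat actions).items.map
          (fun p => (p.1.1, (p.1.2, p.2)))).foldl
          (fun g q => g.modify q.1 [] (· ++ [q.2])) PySem.Dict.empty := by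
    rw [List.foldl_map]
  rw [h1, PySem.Dict.getD_foldl_modify_append, sma_flat_eq, PySem.Dict.items_counter,
    List.filter_map, List.map_map, List.filter_map, List.map_map]
  simp only [Function.comp_def, PySem.Dict.getD_empty, List.nil_append]
  rw [filter_ofList]

-- per-player agreement of the two structures
theorem sma_inner_agree (actions : List (List (String × String))) (n : String) :
    ((sma_stats actions).getD n PySem.Dict.empty).items = (sma_grouped actions).getD n [] := by
  rw [sma_stats_getD, PySem.Dict.items_counter, sma_grouped_getD]
  have hys : (actions.filter (fun a => sma_name a == n)).map sma_act
      = ((actions.map sma_key).filter (fun k => k.1 == n)).map Prod.snd := by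
    rw [List.filter_map, List.map_map]
    rfl
  have hinj : ∀ a ∈ (actions.map sma_key).filter (fun k => k.1 == n),
      ∀ b ∈ (actions.map sma_key).filter (fun k => k.1 == n), Prod.snd a = Prod.snd b → a = b := by
    intro a ha b hb hab
    have ha1 : a.1 = n := by simpa using (List.mem_filter.1 ha).2
    have hb1 : b.1 = n := by simpa using (List.mem_filter.1 hb).2
    exact Prod.ext (ha1.trans hb1.symm) hab
  rw [hys, ofList_map_of_inj _ _ hinj, List.map_map]
  apply List.map_congr_left
  intro k hk
  have hkm : k ∈ (actions.map sma_key).filter (fun k => k.1 == n) :=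
    (PySem.Set.mem_ofList _ _).1 hk
  have hcnt : (((actions.map sma_key).filter (fun k => k.1 == n)).map Prod.snd).count k.2
      = (actions.map sma_key).count k := by
    have h2 := count_map_of_inj ((actions.map sma_key).filter (fun k => k.1 == n)) Prod.snd k
      (fun b hb => hinj b hb k hkm)
    rw [h2, List.count_filter]
    simpa using (List.mem_filter.1 hkm).2
  simp only [Function.comp_def]
  rw [hcnt]

-- ===== VERDICT (by name: the statement is the Claim_ definition above) =====
theorem summarize_match_actions_spec : Claim_equal_summarize_match_actions := by
  intro actions _
  unfold Spec_summarize_match_actions summarize_match_actions summarize_match_actions_alt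
  have hndA : (sma_stats actions).keys.Nodup := by
    unfold sma_stats
    exact PySem.Dict.nodup_keys_foldl_modify_key _ sma_name _ _ _ (by simp)
  have hndB : (sma_grouped actions).keys.Nodup := by
    unfold sma_grouped
    exact PySem.Dict.nodup_keys_foldl_modify_key _ (fun p : (String × Option String) × Int => p.1.1) _ _ _ (by simp)
  rw [PySem.List.foldl_append_singleton_eq_map,
    PySem.Dict.items_eq_map_keys (sma_stats actions) hndA PySem.Dict.empty,
    PySem.Dict.items_eq_map_keys (sma_grouped actions) hndB [],
    List.map_map, List.map_map, sma_stats_keys, sma_grouped_keys]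
  refine congrArg (PySem.Str.join "\n") (List.map_congr_left (fun nm _ => ?_))
  simp only [Function.comp_def]
  rw [sma_inner_agree]
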